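-- pv_equiv track=rewrite | github.com/HelenaCasademunt/SplitPersonalityTraining | experiments/sysprompt/data_analysis/plot_utils.py | parse_result_dir_name
-- ===== SOURCE A (Python) =====
-- from typing import Dict, List, Tuple, Optional
--
-- KNOWN_MODELS = [
--     'baseline',
--     '5pct_no_sysprompt_5pct_swap',
--     '15pct_no_sysprompt_15pct_swap',
--     '15pct_no_sysprompt',
--     '15pct_swap',
--     '33pct_no_sysprompt_33pct_swap',
--     '33pct_no_sysprompt',
--     '33pct_swap',
--     '100pct_no_sysprompt',
--     '100pct_swap',
-- ]
--
-- def parse_result_dir_name(dir_name: str) -> Optional[Tuple[str, str]]: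
--     """Parse model name and eval condition from result directory name.
--
--     Args:
--         dir_name: Directory name like 'results_baseline_eval_swapped'
--
--     Returns:
--         Tuple of (model_name, eval_condition) or None if unrecognized
--     """
--     # Try to match against known models (check longer names first to avoid partial matches)
--     # Sort by length descending to check longest names first
--     for known_model in sorted(KNOWN_MODELS, key=len, reverse=True):
--         prefix = f"results_{known_model}_"
--         if dir_name.startswith(prefix):
--             model = known_model
--             eval_condition = dir_name[len(prefix):]
--             return model, eval_condition
--
--     return None
-- ===== SOURCE B (Python) =====
-- KNOWN_MODELS = [
--     'baseline',
--     '5pct_no_sysprompt_5pct_swap',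
--     '15pct_no_sysprompt_15pct_swap',
--     '15pct_no_sysprompt',
--     '15pct_swap',
--     '33pct_no_sysprompt_33pct_swap',
--     '33pct_no_sysprompt',
--     '33pct_swap',
--     '100pct_no_sysprompt',
--     '100pct_swap',
-- ]
--
-- def parse_result_dir_name(dir_name):
--     """Parse model name and eval condition from result directory name."""
--     candidates = [m for m in KNOWN_MODELS if dir_name.startswith(f"results_{m}_")]
--     if not candidates:
--         return None
--     model = max(candidates, key=len)
--     return model, dir_name[len(f"results_{model}_"):]
-- ===== Notes on version B (the rewrite author's own statement) =====
-- stated objective: simpler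
-- what changed: B drops the length-descending sort and the early-return loop: it filters KNOWN_MODELS for prefix matches in one comprehension, returns None if empty, and otherwise picks the longest match with max(key=len).
import Mathlib
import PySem

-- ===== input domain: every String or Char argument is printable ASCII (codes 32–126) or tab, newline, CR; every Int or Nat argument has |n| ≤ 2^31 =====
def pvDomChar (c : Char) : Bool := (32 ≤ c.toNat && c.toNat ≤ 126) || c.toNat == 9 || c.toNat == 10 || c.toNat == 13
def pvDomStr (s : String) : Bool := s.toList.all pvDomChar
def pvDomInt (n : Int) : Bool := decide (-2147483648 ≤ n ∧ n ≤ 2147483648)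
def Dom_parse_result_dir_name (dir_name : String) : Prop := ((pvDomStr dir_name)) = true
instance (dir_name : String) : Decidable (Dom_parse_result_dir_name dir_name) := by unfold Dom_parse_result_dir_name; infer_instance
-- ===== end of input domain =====

-- B replaces A's sort-by-length-descending + first-match early return by filter-all-matches + max(key=len); objective: a simpler decomposition.

-- ===== PORT A =====
-- module constant KNOWN_MODELS (shared by both Pythons)
def pvKnownModels : List String :=
  ["baseline",
   "5pct_no_sysprompt_5pct_swap",
   "15pct_no_sysprompt_15pct_swap",
   "15pct_no_sysprompt",
   "15pct_swap",
   "33pct_no_sysprompt_33pct_swap",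
   "33pct_no_sysprompt",
   "33pct_swap",
   "100pct_no_sysprompt",
   "100pct_swap"]

-- the 'for known_model in sorted(KNOWN_MODELS, key=len, reverse=True)' loop with its early return
def pvLoopA (dir_name : String) : List String → Option (String × String)
  | [] => none
  | known_model :: rest =>
    let pfx := "results_" ++ known_model ++ "_"
    if PySem.Str.startswith dir_name pfx then
      some (known_model, PySem.Str.slice dir_name (some (PySem.Str.len pfx)) none)
    else pvLoopA dir_name rest

def parse_result_dir_name (dir_name : String) : Option (String × String) :=
  pvLoopA dir_name (PySem.List.sorted pvKnownModels (fun m => PySem.Str.len m) true)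

-- ===== PORT B =====
def parse_result_dir_name_alt (dir_name : String) : Option (String × String) :=
  let candidates := pvKnownModels.filter (fun m => PySem.Str.startswith dir_name ("results_" ++ m ++ "_"))
  match PySem.List.max? candidates (fun m => PySem.Str.len m) with
  | none => none
  | some model =>
      some (model, PySem.Str.slice dir_name (some (PySem.Str.len ("results_" ++ model ++ "_"))) none)

-- ===== PRECONDITION & SPEC =====
def Spec_parse_result_dir_name (dir_name : String) (out : Option (String × String)) : Prop := out = parse_result_dir_name_alt dir_name
instance (dir_name : String) (out : Option (String × String)) : Decidable (Spec_parse_result_dir_name dir_name out) := by unfold Spec_parse_result_dir_name; infer_instance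

-- ===== CLAIM (what is proved, stated in full; the proofs are below) =====
def Claim_equal_parse_result_dir_name : Prop := ∀ (dir_name : String), Dom_parse_result_dir_name dir_name → Spec_parse_result_dir_name dir_name (parse_result_dir_name dir_name)

-- ===== LEMMAS AND PROOFS =====

-- sorted(KNOWN_MODELS, key=len, reverse=True), evaluated once
set_option maxHeartbeats 1000000 in
theorem pvSortedKM :
    PySem.List.sorted pvKnownModels (fun m => PySem.Str.len m) true =
      ["15pct_no_sysprompt_15pct_swap",
       "33pct_no_sysprompt_33pct_swap",
       "5pct_no_sysprompt_5pct_swap",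
       "100pct_no_sysprompt",
       "15pct_no_sysprompt",
       "33pct_no_sysprompt",
       "100pct_swap",
       "15pct_swap",
       "33pct_swap",
       "baseline"] := by decide

-- lengths of the model-name literals
theorem pvLen_0 : PySem.Str.len "baseline" = 8 := by simp [PySem.Str.len]
theorem pvLen_1 : PySem.Str.len "5pct_no_sysprompt_5pct_swap" = 27 := by simp [PySem.Str.len]
theorem pvLen_2 : PySem.Str.len "15pct_no_sysprompt_15pct_swap" = 29 := by simp [PySem.Str.len]
theorem pvLen_3 : PySem.Str.len "15pct_no_sysprompt" = 18 := by simp [PySem.Str.len]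
theorem pvLen_4 : PySem.Str.len "15pct_swap" = 10 := by simp [PySem.Str.len]
theorem pvLen_5 : PySem.Str.len "33pct_no_sysprompt_33pct_swap" = 29 := by simp [PySem.Str.len]
theorem pvLen_6 : PySem.Str.len "33pct_no_sysprompt" = 18 := by simp [PySem.Str.len]
theorem pvLen_7 : PySem.Str.len "33pct_swap" = 10 := by simp [PySem.Str.len]
theorem pvLen_8 : PySem.Str.len "100pct_no_sysprompt" = 19 := by simp [PySem.Str.len]
theorem pvLen_9 : PySem.Str.len "100pct_swap" = 11 := by simp [PySem.Str.len]

-- the running-best step of PySem.List.max?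
def pvG {α : Type} (key : α → Int) (acc : Option α) (x : α) : Option α :=
  match acc with
  | none => some x
  | some m => if key m < key x then some x else some m

-- once the running best is m and no later element strictly exceeds it, it stays m
theorem pvKeep {α : Type} (key : α → Int) (m : α) (l : List α)
    (h : ∀ x ∈ l, key x ≤ key m) :
    List.foldl (pvG key) (some m) l = some m := by
  induction l with
  | nil => rfl
  | cons a t ih =>
    have ha := h a (by simp)
    have hg : pvG key (some m) a = some m := by
      simp only [pvG]; rw [if_neg (by omega)]
    rw [List.foldl_cons, hg]
    exact ih (fun x hx => h x (List.mem_cons_of_mem a hx))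

theorem pvStep {α : Type} (key : α → Int) (m : α) (l2 : List α)
    (h2 : ∀ x ∈ l2, key x ≤ key m) :
    ∀ (l1 : List α), (∀ x ∈ l1, key x < key m) →
    ∀ (acc : Option α), (∀ y, acc = some y → key y < key m) →
    List.foldl (pvG key) acc (l1 ++ m :: l2) = some m := by
  intro l1
  induction l1 with
  | nil =>
    intro _ acc hacc
    have hg : pvG key acc m = some m := by
      cases acc with
      | none => rfl
      | some y => have hy := hacc y rfl; simp only [pvG]; rw [if_pos hy]
    rw [List.nil_append, List.foldl_cons, hg]
    exact pvKeep key m l2 h2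
  | cons a t ih =>
    intro h1 acc hacc
    rw [List.cons_append, List.foldl_cons]
    refine ih (fun x hx => h1 x (List.mem_cons_of_mem a hx)) (pvG key acc a) ?_
    intro y hy
    have hax := h1 a (by simp)
    cases acc with
    | none =>
      simp only [pvG] at hy
      rw [Option.some.injEq] at hy
      subst hy; exact hax
    | some b =>
      have hb := hacc b rfl
      simp only [pvG] at hy
      split at hy <;> rw [Option.some.injEq] at hy <;> subst hy <;> omega

-- max(candidates, key=len) returns the FIRST element of maximal key
theorem pvFirstMax {α : Type} (key : α → Int) (l1 l2 : List α) (m : α)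
    (h1 : ∀ x ∈ l1, key x < key m) (h2 : ∀ x ∈ l2, key x ≤ key m) :
    PySem.List.max? (l1 ++ m :: l2) key = some m := by
  have h := pvStep key m l2 h2 l1 h1 none (by intro y hy; cases hy)
  exact h

theorem pvFilterConsPos {α : Type} (p : α → Bool) (a : α) (l : List α) (h : p a = true) :
    List.filter p (a :: l) = a :: List.filter p l := by
  simp [h]

theorem pvFilterConsNeg {α : Type} (p : α → Bool) (a : α) (l : List α) (h : ¬ p a = true) :
    List.filter p (a :: l) = List.filter p l := by
  simp [h]

-- ===== VERDICT (by name: the statement is the Claim_ definition above) =====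
set_option maxHeartbeats 1000000 in
theorem parse_result_dir_name_spec : Claim_equal_parse_result_dir_name := by
  intro dir _
  unfold Spec_parse_result_dir_name
  simp only [parse_result_dir_name, parse_result_dir_name_alt]
  rw [pvSortedKM]
  simp only [pvLoopA]
  split_ifs with h1 h2 h3 h4 h5 h6 h7 h8 h9 h10
  · -- matched model 15pct_no_sysprompt_15pct_swap
    have hA : ∀ x ∈ List.filter (fun s => PySem.Str.startswith dir ("results_" ++ s ++ "_")) (["baseline", "5pct_no_sysprompt_5pct_swap"] : List String), PySem.Str.len x < PySem.Str.len "15pct_no_sysprompt_15pct_swap" := by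
      intro x hx
      rw [List.mem_filter] at hx
      obtain ⟨hm, hp⟩ := hx
      simp only [List.mem_cons, List.not_mem_nil, or_false] at hm
      rcases hm with rfl|rfl
      · rw [pvLen_0, pvLen_2] <;> decide
      · rw [pvLen_1, pvLen_2] <;> decide
    have hB : ∀ x ∈ List.filter (fun s => PySem.Str.startswith dir ("results_" ++ s ++ "_")) (["15pct_no_sysprompt", "15pct_swap", "33pct_no_sysprompt_33pct_swap", "33pct_no_sysprompt", "33pct_swap", "100pct_no_sysprompt", "100pct_swap"] : List String), PySem.Str.len x ≤ PySem.Str.len "15pct_no_sysprompt_15pct_swap" := by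
      intro x hx
      rw [List.mem_filter] at hx
      obtain ⟨hm, hp⟩ := hx
      simp only [List.mem_cons, List.not_mem_nil, or_false] at hm
      rcases hm with rfl|rfl|rfl|rfl|rfl|rfl|rfl
      · rw [pvLen_3, pvLen_2] <;> decide
      · rw [pvLen_4, pvLen_2] <;> decide
      · rw [pvLen_5, pvLen_2] <;> decide
      · rw [pvLen_6, pvLen_2] <;> decide
      · rw [pvLen_7, pvLen_2] <;> decide
      · rw [pvLen_8, pvLen_2] <;> decide
      · rw [pvLen_9, pvLen_2] <;> decide
    rw [show pvKnownModels = (["baseline", "5pct_no_sysprompt_5pct_swap"] : List String) ++ "15pct_no_sysprompt_15pct_swap" :: (["15pct_no_sysprompt", "15pct_swap", "33pct_no_sysprompt_33pct_swap", "33pct_no_sysprompt", "33pct_swap", "100pct_no_sysprompt", "100pct_swap"] : List String) from rfl,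
        List.filter_append,
        pvFilterConsPos (fun s => PySem.Str.startswith dir ("results_" ++ s ++ "_")) "15pct_no_sysprompt_15pct_swap" (["15pct_no_sysprompt", "15pct_swap", "33pct_no_sysprompt_33pct_swap", "33pct_no_sysprompt", "33pct_swap", "100pct_no_sysprompt", "100pct_swap"] : List String) h1,
        pvFirstMax (fun s => PySem.Str.len s) _ _ _ hA hB]
    all_goals rfl
  · -- matched model 33pct_no_sysprompt_33pct_swap
    have hA : ∀ x ∈ List.filter (fun s => PySem.Str.startswith dir ("results_" ++ s ++ "_")) (["baseline", "5pct_no_sysprompt_5pct_swap", "15pct_no_sysprompt_15pct_swap", "15pct_no_sysprompt", "15pct_swap"] : List String), PySem.Str.len x < PySem.Str.len "33pct_no_sysprompt_33pct_swap" := by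
      intro x hx
      rw [List.mem_filter] at hx
      obtain ⟨hm, hp⟩ := hx
      simp only [List.mem_cons, List.not_mem_nil, or_false] at hm
      rcases hm with rfl|rfl|rfl|rfl|rfl
      · rw [pvLen_0, pvLen_5] <;> decide
      · rw [pvLen_1, pvLen_5] <;> decide
      · exact absurd hp h1
      · rw [pvLen_3, pvLen_5] <;> decide
      · rw [pvLen_4, pvLen_5] <;> decide
    have hB : ∀ x ∈ List.filter (fun s => PySem.Str.startswith dir ("results_" ++ s ++ "_")) (["33pct_no_sysprompt", "33pct_swap", "100pct_no_sysprompt", "100pct_swap"] : List String), PySem.Str.len x ≤ PySem.Str.len "33pct_no_sysprompt_33pct_swap" := by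
      intro x hx
      rw [List.mem_filter] at hx
      obtain ⟨hm, hp⟩ := hx
      simp only [List.mem_cons, List.not_mem_nil, or_false] at hm
      rcases hm with rfl|rfl|rfl|rfl
      · rw [pvLen_6, pvLen_5] <;> decide
      · rw [pvLen_7, pvLen_5] <;> decide
      · rw [pvLen_8, pvLen_5] <;> decide
      · rw [pvLen_9, pvLen_5] <;> decide
    rw [show pvKnownModels = (["baseline", "5pct_no_sysprompt_5pct_swap", "15pct_no_sysprompt_15pct_swap", "15pct_no_sysprompt", "15pct_swap"] : List String) ++ "33pct_no_sysprompt_33pct_swap" :: (["33pct_no_sysprompt", "33pct_swap", "100pct_no_sysprompt", "100pct_swap"] : List String) from rfl,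
        List.filter_append,
        pvFilterConsPos (fun s => PySem.Str.startswith dir ("results_" ++ s ++ "_")) "33pct_no_sysprompt_33pct_swap" (["33pct_no_sysprompt", "33pct_swap", "100pct_no_sysprompt", "100pct_swap"] : List String) h2,
        pvFirstMax (fun s => PySem.Str.len s) _ _ _ hA hB]
    all_goals rfl
  · -- matched model 5pct_no_sysprompt_5pct_swap
    have hA : ∀ x ∈ List.filter (fun s => PySem.Str.startswith dir ("results_" ++ s ++ "_")) (["baseline"] : List String), PySem.Str.len x < PySem.Str.len "5pct_no_sysprompt_5pct_swap" := by
      intro x hx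
      rw [List.mem_filter] at hx
      obtain ⟨hm, hp⟩ := hx
      simp only [List.mem_cons, List.not_mem_nil, or_false] at hm
      rcases hm with rfl
      · rw [pvLen_0, pvLen_1] <;> decide
    have hB : ∀ x ∈ List.filter (fun s => PySem.Str.startswith dir ("results_" ++ s ++ "_")) (["15pct_no_sysprompt_15pct_swap", "15pct_no_sysprompt", "15pct_swap", "33pct_no_sysprompt_33pct_swap", "33pct_no_sysprompt", "33pct_swap", "100pct_no_sysprompt", "100pct_swap"] : List String), PySem.Str.len x ≤ PySem.Str.len "5pct_no_sysprompt_5pct_swap" := by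
      intro x hx
      rw [List.mem_filter] at hx
      obtain ⟨hm, hp⟩ := hx
      simp only [List.mem_cons, List.not_mem_nil, or_false] at hm
      rcases hm with rfl|rfl|rfl|rfl|rfl|rfl|rfl|rfl
      · exact absurd hp h1
      · rw [pvLen_3, pvLen_1] <;> decide
      · rw [pvLen_4, pvLen_1] <;> decide
      · exact absurd hp h2
      · rw [pvLen_6, pvLen_1] <;> decide
      · rw [pvLen_7, pvLen_1] <;> decide
      · rw [pvLen_8, pvLen_1] <;> decide
      · rw [pvLen_9, pvLen_1] <;> decide
    rw [show pvKnownModels = (["baseline"] : List String) ++ "5pct_no_sysprompt_5pct_swap" :: (["15pct_no_sysprompt_15pct_swap", "15pct_no_sysprompt", "15pct_swap", "33pct_no_sysprompt_33pct_swap", "33pct_no_sysprompt", "33pct_swap", "100pct_no_sysprompt", "100pct_swap"] : List String) from rfl,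
        List.filter_append,
        pvFilterConsPos (fun s => PySem.Str.startswith dir ("results_" ++ s ++ "_")) "5pct_no_sysprompt_5pct_swap" (["15pct_no_sysprompt_15pct_swap", "15pct_no_sysprompt", "15pct_swap", "33pct_no_sysprompt_33pct_swap", "33pct_no_sysprompt", "33pct_swap", "100pct_no_sysprompt", "100pct_swap"] : List String) h3,
        pvFirstMax (fun s => PySem.Str.len s) _ _ _ hA hB]
    all_goals rfl
  · -- matched model 100pct_no_sysprompt
    have hA : ∀ x ∈ List.filter (fun s => PySem.Str.startswith dir ("results_" ++ s ++ "_")) (["baseline", "5pct_no_sysprompt_5pct_swap", "15pct_no_sysprompt_15pct_swap", "15pct_no_sysprompt", "15pct_swap", "33pct_no_sysprompt_33pct_swap", "33pct_no_sysprompt", "33pct_swap"] : List String), PySem.Str.len x < PySem.Str.len "100pct_no_sysprompt" := by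
      intro x hx
      rw [List.mem_filter] at hx
      obtain ⟨hm, hp⟩ := hx
      simp only [List.mem_cons, List.not_mem_nil, or_false] at hm
      rcases hm with rfl|rfl|rfl|rfl|rfl|rfl|rfl|rfl
      · rw [pvLen_0, pvLen_8] <;> decide
      · exact absurd hp h3
      · exact absurd hp h1
      · rw [pvLen_3, pvLen_8] <;> decide
      · rw [pvLen_4, pvLen_8] <;> decide
      · exact absurd hp h2
      · rw [pvLen_6, pvLen_8] <;> decide
      · rw [pvLen_7, pvLen_8] <;> decide
    have hB : ∀ x ∈ List.filter (fun s => PySem.Str.startswith dir ("results_" ++ s ++ "_")) (["100pct_swap"] : List String), PySem.Str.len x ≤ PySem.Str.len "100pct_no_sysprompt" := by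
      intro x hx
      rw [List.mem_filter] at hx
      obtain ⟨hm, hp⟩ := hx
      simp only [List.mem_cons, List.not_mem_nil, or_false] at hm
      rcases hm with rfl
      · rw [pvLen_9, pvLen_8] <;> decide
    rw [show pvKnownModels = (["baseline", "5pct_no_sysprompt_5pct_swap", "15pct_no_sysprompt_15pct_swap", "15pct_no_sysprompt", "15pct_swap", "33pct_no_sysprompt_33pct_swap", "33pct_no_sysprompt", "33pct_swap"] : List String) ++ "100pct_no_sysprompt" :: (["100pct_swap"] : List String) from rfl,
        List.filter_append,
        pvFilterConsPos (fun s => PySem.Str.startswith dir ("results_" ++ s ++ "_")) "100pct_no_sysprompt" (["100pct_swap"] : List String) h4,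
        pvFirstMax (fun s => PySem.Str.len s) _ _ _ hA hB]
    all_goals rfl
  · -- matched model 15pct_no_sysprompt
    have hA : ∀ x ∈ List.filter (fun s => PySem.Str.startswith dir ("results_" ++ s ++ "_")) (["baseline", "5pct_no_sysprompt_5pct_swap", "15pct_no_sysprompt_15pct_swap"] : List String), PySem.Str.len x < PySem.Str.len "15pct_no_sysprompt" := by
      intro x hx
      rw [List.mem_filter] at hx
      obtain ⟨hm, hp⟩ := hx
      simp only [List.mem_cons, List.not_mem_nil, or_false] at hm
      rcases hm with rfl|rfl|rfl
      · rw [pvLen_0, pvLen_3] <;> decide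
      · exact absurd hp h3
      · exact absurd hp h1
    have hB : ∀ x ∈ List.filter (fun s => PySem.Str.startswith dir ("results_" ++ s ++ "_")) (["15pct_swap", "33pct_no_sysprompt_33pct_swap", "33pct_no_sysprompt", "33pct_swap", "100pct_no_sysprompt", "100pct_swap"] : List String), PySem.Str.len x ≤ PySem.Str.len "15pct_no_sysprompt" := by
      intro x hx
      rw [List.mem_filter] at hx
      obtain ⟨hm, hp⟩ := hx
      simp only [List.mem_cons, List.not_mem_nil, or_false] at hm
      rcases hm with rfl|rfl|rfl|rfl|rfl|rfl
      · rw [pvLen_4, pvLen_3] <;> decide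
      · exact absurd hp h2
      · rw [pvLen_6, pvLen_3] <;> decide
      · rw [pvLen_7, pvLen_3] <;> decide
      · exact absurd hp h4
      · rw [pvLen_9, pvLen_3] <;> decide
    rw [show pvKnownModels = (["baseline", "5pct_no_sysprompt_5pct_swap", "15pct_no_sysprompt_15pct_swap"] : List String) ++ "15pct_no_sysprompt" :: (["15pct_swap", "33pct_no_sysprompt_33pct_swap", "33pct_no_sysprompt", "33pct_swap", "100pct_no_sysprompt", "100pct_swap"] : List String) from rfl,
        List.filter_append,
        pvFilterConsPos (fun s => PySem.Str.startswith dir ("results_" ++ s ++ "_")) "15pct_no_sysprompt" (["15pct_swap", "33pct_no_sysprompt_33pct_swap", "33pct_no_sysprompt", "33pct_swap", "100pct_no_sysprompt", "100pct_swap"] : List String) h5,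
        pvFirstMax (fun s => PySem.Str.len s) _ _ _ hA hB]
    all_goals rfl
  · -- matched model 33pct_no_sysprompt
    have hA : ∀ x ∈ List.filter (fun s => PySem.Str.startswith dir ("results_" ++ s ++ "_")) (["baseline", "5pct_no_sysprompt_5pct_swap", "15pct_no_sysprompt_15pct_swap", "15pct_no_sysprompt", "15pct_swap", "33pct_no_sysprompt_33pct_swap"] : List String), PySem.Str.len x < PySem.Str.len "33pct_no_sysprompt" := by
      intro x hx
      rw [List.mem_filter] at hx
      obtain ⟨hm, hp⟩ := hx
      simp only [List.mem_cons, List.not_mem_nil, or_false] at hm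
      rcases hm with rfl|rfl|rfl|rfl|rfl|rfl
      · rw [pvLen_0, pvLen_6] <;> decide
      · exact absurd hp h3
      · exact absurd hp h1
      · exact absurd hp h5
      · rw [pvLen_4, pvLen_6] <;> decide
      · exact absurd hp h2
    have hB : ∀ x ∈ List.filter (fun s => PySem.Str.startswith dir ("results_" ++ s ++ "_")) (["33pct_swap", "100pct_no_sysprompt", "100pct_swap"] : List String), PySem.Str.len x ≤ PySem.Str.len "33pct_no_sysprompt" := by
      intro x hx
      rw [List.mem_filter] at hx
      obtain ⟨hm, hp⟩ := hx
      simp only [List.mem_cons, List.not_mem_nil, or_false] at hm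
      rcases hm with rfl|rfl|rfl
      · rw [pvLen_7, pvLen_6] <;> decide
      · exact absurd hp h4
      · rw [pvLen_9, pvLen_6] <;> decide
    rw [show pvKnownModels = (["baseline", "5pct_no_sysprompt_5pct_swap", "15pct_no_sysprompt_15pct_swap", "15pct_no_sysprompt", "15pct_swap", "33pct_no_sysprompt_33pct_swap"] : List String) ++ "33pct_no_sysprompt" :: (["33pct_swap", "100pct_no_sysprompt", "100pct_swap"] : List String) from rfl,
        List.filter_append,
        pvFilterConsPos (fun s => PySem.Str.startswith dir ("results_" ++ s ++ "_")) "33pct_no_sysprompt" (["33pct_swap", "100pct_no_sysprompt", "100pct_swap"] : List String) h6,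
        pvFirstMax (fun s => PySem.Str.len s) _ _ _ hA hB]
    all_goals rfl
  · -- matched model 100pct_swap
    have hA : ∀ x ∈ List.filter (fun s => PySem.Str.startswith dir ("results_" ++ s ++ "_")) (["baseline", "5pct_no_sysprompt_5pct_swap", "15pct_no_sysprompt_15pct_swap", "15pct_no_sysprompt", "15pct_swap", "33pct_no_sysprompt_33pct_swap", "33pct_no_sysprompt", "33pct_swap", "100pct_no_sysprompt"] : List String), PySem.Str.len x < PySem.Str.len "100pct_swap" := by
      intro x hx
      rw [List.mem_filter] at hx
      obtain ⟨hm, hp⟩ := hx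
      simp only [List.mem_cons, List.not_mem_nil, or_false] at hm
      rcases hm with rfl|rfl|rfl|rfl|rfl|rfl|rfl|rfl|rfl
      · rw [pvLen_0, pvLen_9] <;> decide
      · exact absurd hp h3
      · exact absurd hp h1
      · exact absurd hp h5
      · rw [pvLen_4, pvLen_9] <;> decide
      · exact absurd hp h2
      · exact absurd hp h6
      · rw [pvLen_7, pvLen_9] <;> decide
      · exact absurd hp h4
    have hB : ∀ x ∈ List.filter (fun s => PySem.Str.startswith dir ("results_" ++ s ++ "_")) ([] : List String), PySem.Str.len x ≤ PySem.Str.len "100pct_swap" := by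
      intro x hx
      simp at hx
    rw [show pvKnownModels = (["baseline", "5pct_no_sysprompt_5pct_swap", "15pct_no_sysprompt_15pct_swap", "15pct_no_sysprompt", "15pct_swap", "33pct_no_sysprompt_33pct_swap", "33pct_no_sysprompt", "33pct_swap", "100pct_no_sysprompt"] : List String) ++ "100pct_swap" :: ([] : List String) from rfl,
        List.filter_append,
        pvFilterConsPos (fun s => PySem.Str.startswith dir ("results_" ++ s ++ "_")) "100pct_swap" ([] : List String) h7,
        pvFirstMax (fun s => PySem.Str.len s) _ _ _ hA hB]
    all_goals rfl
  · -- matched model 15pct_swap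
    have hA : ∀ x ∈ List.filter (fun s => PySem.Str.startswith dir ("results_" ++ s ++ "_")) (["baseline", "5pct_no_sysprompt_5pct_swap", "15pct_no_sysprompt_15pct_swap", "15pct_no_sysprompt"] : List String), PySem.Str.len x < PySem.Str.len "15pct_swap" := by
      intro x hx
      rw [List.mem_filter] at hx
      obtain ⟨hm, hp⟩ := hx
      simp only [List.mem_cons, List.not_mem_nil, or_false] at hm
      rcases hm with rfl|rfl|rfl|rfl
      · rw [pvLen_0, pvLen_4] <;> decide
      · exact absurd hp h3
      · exact absurd hp h1
      · exact absurd hp h5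
    have hB : ∀ x ∈ List.filter (fun s => PySem.Str.startswith dir ("results_" ++ s ++ "_")) (["33pct_no_sysprompt_33pct_swap", "33pct_no_sysprompt", "33pct_swap", "100pct_no_sysprompt", "100pct_swap"] : List String), PySem.Str.len x ≤ PySem.Str.len "15pct_swap" := by
      intro x hx
      rw [List.mem_filter] at hx
      obtain ⟨hm, hp⟩ := hx
      simp only [List.mem_cons, List.not_mem_nil, or_false] at hm
      rcases hm with rfl|rfl|rfl|rfl|rfl
      · exact absurd hp h2
      · exact absurd hp h6
      · rw [pvLen_7, pvLen_4] <;> decide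
      · exact absurd hp h4
      · exact absurd hp h7
    rw [show pvKnownModels = (["baseline", "5pct_no_sysprompt_5pct_swap", "15pct_no_sysprompt_15pct_swap", "15pct_no_sysprompt"] : List String) ++ "15pct_swap" :: (["33pct_no_sysprompt_33pct_swap", "33pct_no_sysprompt", "33pct_swap", "100pct_no_sysprompt", "100pct_swap"] : List String) from rfl,
        List.filter_append,
        pvFilterConsPos (fun s => PySem.Str.startswith dir ("results_" ++ s ++ "_")) "15pct_swap" (["33pct_no_sysprompt_33pct_swap", "33pct_no_sysprompt", "33pct_swap", "100pct_no_sysprompt", "100pct_swap"] : List String) h8,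
        pvFirstMax (fun s => PySem.Str.len s) _ _ _ hA hB]
    all_goals rfl
  · -- matched model 33pct_swap
    have hA : ∀ x ∈ List.filter (fun s => PySem.Str.startswith dir ("results_" ++ s ++ "_")) (["baseline", "5pct_no_sysprompt_5pct_swap", "15pct_no_sysprompt_15pct_swap", "15pct_no_sysprompt", "15pct_swap", "33pct_no_sysprompt_33pct_swap", "33pct_no_sysprompt"] : List String), PySem.Str.len x < PySem.Str.len "33pct_swap" := by
      intro x hx
      rw [List.mem_filter] at hx
      obtain ⟨hm, hp⟩ := hx
      simp only [List.mem_cons, List.not_mem_nil, or_false] at hm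
      rcases hm with rfl|rfl|rfl|rfl|rfl|rfl|rfl
      · rw [pvLen_0, pvLen_7] <;> decide
      · exact absurd hp h3
      · exact absurd hp h1
      · exact absurd hp h5
      · exact absurd hp h8
      · exact absurd hp h2
      · exact absurd hp h6
    have hB : ∀ x ∈ List.filter (fun s => PySem.Str.startswith dir ("results_" ++ s ++ "_")) (["100pct_no_sysprompt", "100pct_swap"] : List String), PySem.Str.len x ≤ PySem.Str.len "33pct_swap" := by
      intro x hx
      rw [List.mem_filter] at hx
      obtain ⟨hm, hp⟩ := hx
      simp only [List.mem_cons, List.not_mem_nil, or_false] at hm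
      rcases hm with rfl|rfl
      · exact absurd hp h4
      · exact absurd hp h7
    rw [show pvKnownModels = (["baseline", "5pct_no_sysprompt_5pct_swap", "15pct_no_sysprompt_15pct_swap", "15pct_no_sysprompt", "15pct_swap", "33pct_no_sysprompt_33pct_swap", "33pct_no_sysprompt"] : List String) ++ "33pct_swap" :: (["100pct_no_sysprompt", "100pct_swap"] : List String) from rfl,
        List.filter_append,
        pvFilterConsPos (fun s => PySem.Str.startswith dir ("results_" ++ s ++ "_")) "33pct_swap" (["100pct_no_sysprompt", "100pct_swap"] : List String) h9,
        pvFirstMax (fun s => PySem.Str.len s) _ _ _ hA hB]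
    all_goals rfl
  · -- matched model baseline
    have hA : ∀ x ∈ List.filter (fun s => PySem.Str.startswith dir ("results_" ++ s ++ "_")) ([] : List String), PySem.Str.len x < PySem.Str.len "baseline" := by
      intro x hx
      simp at hx
    have hB : ∀ x ∈ List.filter (fun s => PySem.Str.startswith dir ("results_" ++ s ++ "_")) (["5pct_no_sysprompt_5pct_swap", "15pct_no_sysprompt_15pct_swap", "15pct_no_sysprompt", "15pct_swap", "33pct_no_sysprompt_33pct_swap", "33pct_no_sysprompt", "33pct_swap", "100pct_no_sysprompt", "100pct_swap"] : List String), PySem.Str.len x ≤ PySem.Str.len "baseline" := by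
      intro x hx
      rw [List.mem_filter] at hx
      obtain ⟨hm, hp⟩ := hx
      simp only [List.mem_cons, List.not_mem_nil, or_false] at hm
      rcases hm with rfl|rfl|rfl|rfl|rfl|rfl|rfl|rfl|rfl
      · exact absurd hp h3
      · exact absurd hp h1
      · exact absurd hp h5
      · exact absurd hp h8
      · exact absurd hp h2
      · exact absurd hp h6
      · exact absurd hp h9
      · exact absurd hp h4
      · exact absurd hp h7
    rw [show pvKnownModels = ([] : List String) ++ "baseline" :: (["5pct_no_sysprompt_5pct_swap", "15pct_no_sysprompt_15pct_swap", "15pct_no_sysprompt", "15pct_swap", "33pct_no_sysprompt_33pct_swap", "33pct_no_sysprompt", "33pct_swap", "100pct_no_sysprompt", "100pct_swap"] : List String) from rfl,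
        List.filter_append,
        pvFilterConsPos (fun s => PySem.Str.startswith dir ("results_" ++ s ++ "_")) "baseline" (["5pct_no_sysprompt_5pct_swap", "15pct_no_sysprompt_15pct_swap", "15pct_no_sysprompt", "15pct_swap", "33pct_no_sysprompt_33pct_swap", "33pct_no_sysprompt", "33pct_swap", "100pct_no_sysprompt", "100pct_swap"] : List String) h10,
        pvFirstMax (fun s => PySem.Str.len s) _ _ _ hA hB]
    all_goals rfl
  · -- no model matched
    rw [show pvKnownModels = (["baseline", "5pct_no_sysprompt_5pct_swap", "15pct_no_sysprompt_15pct_swap", "15pct_no_sysprompt", "15pct_swap", "33pct_no_sysprompt_33pct_swap", "33pct_no_sysprompt", "33pct_swap", "100pct_no_sysprompt", "100pct_swap"] : List String) from rfl,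
        pvFilterConsNeg (fun s => PySem.Str.startswith dir ("results_" ++ s ++ "_")) "baseline" (["5pct_no_sysprompt_5pct_swap", "15pct_no_sysprompt_15pct_swap", "15pct_no_sysprompt", "15pct_swap", "33pct_no_sysprompt_33pct_swap", "33pct_no_sysprompt", "33pct_swap", "100pct_no_sysprompt", "100pct_swap"] : List String) h10,
        pvFilterConsNeg (fun s => PySem.Str.startswith dir ("results_" ++ s ++ "_")) "5pct_no_sysprompt_5pct_swap" (["15pct_no_sysprompt_15pct_swap", "15pct_no_sysprompt", "15pct_swap", "33pct_no_sysprompt_33pct_swap", "33pct_no_sysprompt", "33pct_swap", "100pct_no_sysprompt", "100pct_swap"] : List String) h3,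
        pvFilterConsNeg (fun s => PySem.Str.startswith dir ("results_" ++ s ++ "_")) "15pct_no_sysprompt_15pct_swap" (["15pct_no_sysprompt", "15pct_swap", "33pct_no_sysprompt_33pct_swap", "33pct_no_sysprompt", "33pct_swap", "100pct_no_sysprompt", "100pct_swap"] : List String) h1,
        pvFilterConsNeg (fun s => PySem.Str.startswith dir ("results_" ++ s ++ "_")) "15pct_no_sysprompt" (["15pct_swap", "33pct_no_sysprompt_33pct_swap", "33pct_no_sysprompt", "33pct_swap", "100pct_no_sysprompt", "100pct_swap"] : List String) h5,
        pvFilterConsNeg (fun s => PySem.Str.startswith dir ("results_" ++ s ++ "_")) "15pct_swap" (["33pct_no_sysprompt_33pct_swap", "33pct_no_sysprompt", "33pct_swap", "100pct_no_sysprompt", "100pct_swap"] : List String) h8,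
        pvFilterConsNeg (fun s => PySem.Str.startswith dir ("results_" ++ s ++ "_")) "33pct_no_sysprompt_33pct_swap" (["33pct_no_sysprompt", "33pct_swap", "100pct_no_sysprompt", "100pct_swap"] : List String) h2,
        pvFilterConsNeg (fun s => PySem.Str.startswith dir ("results_" ++ s ++ "_")) "33pct_no_sysprompt" (["33pct_swap", "100pct_no_sysprompt", "100pct_swap"] : List String) h6,
        pvFilterConsNeg (fun s => PySem.Str.startswith dir ("results_" ++ s ++ "_")) "33pct_swap" (["100pct_no_sysprompt", "100pct_swap"] : List String) h9,
        pvFilterConsNeg (fun s => PySem.Str.startswith dir ("results_" ++ s ++ "_")) "100pct_no_sysprompt" (["100pct_swap"] : List String) h4,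
        pvFilterConsNeg (fun s => PySem.Str.startswith dir ("results_" ++ s ++ "_")) "100pct_swap" ([] : List String) h7,
        List.filter_nil]
    all_goals rfl
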